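-- pv_equiv track=rewrite | github.com/JannaKim/PS | programmers/캐시답.py | solution
-- ===== SOURCE A (Python) =====
-- class Trie :
--     def __init__(self) :
--         self.count = 0
--         self.child = {}
--     def insert(self, s, pos) :
--         self.count = self.count + 1 # 거쳐간 수 저장. 이미있던 노드였다면 2 이상으로 늘어날 것
--         if pos == len(s) :
--             return
--         if s[pos] not in self.child: # 끝까지 밀어넣음. 없으면 노드 새로 생성
--             self.child[s[pos]] = Trie()
--         self.child[s[pos]].insert(s, pos + 1)
--     def find(self, s, pos) :
--         if len(s) == pos :
--             return pos
--         if self.count == 1 : # 1이면 중복방문이 없었던거임 볼것도 없이 리턴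
--             return pos
--         return self.child[s[pos]].find(s, pos + 1)
--
-- def solution(words):
--     answer = 0
--     trie = Trie()
--     for s in words :
--         trie.insert(s, 0)
--     for s in words :
--         answer = answer + trie.find(s, 0)
--     return answer
-- ===== SOURCE B (Python) =====
-- def lcp(s, t):
--     i = 0
--     while i < len(s) and i < len(t) and s[i] == t[i]:
--         i += 1
--     return i
--
-- def solution(words):
--     answer = 0
--     for i, s in enumerate(words):
--         m = -1
--         for j, t in enumerate(words):
--             if j != i:
--                 m = max(m, lcp(s, t))
--         answer += min(len(s), m + 1)
--     return answer
-- ===== Notes on version B (the rewrite author's own statement) =====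
-- stated objective: alternative
-- what changed: Replaces the count-annotated trie (build + per-word descent) with a direct pairwise scan: each word's answer is min(len(word), 1 + max LCP with any other word), no trie structure at all.
import Mathlib
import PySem

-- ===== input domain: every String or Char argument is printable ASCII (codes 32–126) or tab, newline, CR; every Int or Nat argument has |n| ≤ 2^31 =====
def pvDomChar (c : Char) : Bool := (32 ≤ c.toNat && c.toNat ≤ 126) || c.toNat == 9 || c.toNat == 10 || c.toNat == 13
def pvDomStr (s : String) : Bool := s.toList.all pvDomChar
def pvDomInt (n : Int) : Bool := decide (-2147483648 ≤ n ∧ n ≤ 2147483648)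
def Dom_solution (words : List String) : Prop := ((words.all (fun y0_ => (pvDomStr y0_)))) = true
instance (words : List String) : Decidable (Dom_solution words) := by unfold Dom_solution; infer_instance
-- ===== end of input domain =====

-- B replaces A's count-annotated trie by a direct pairwise scan: each word contributes
-- min(len(word), 1 + max LCP with any other word). Alternative algorithm, same exact value.

-- ===== PORT A =====
-- A's Trie objects are encoded flatly: a node is identified by its path from the root,
-- so `self.child[c]`-chasing becomes looking up the path `s.take pos`, and `self.count`
-- is the Int stored for that path; the counts maintained are exactly A's node counts.
-- (Python tests `pos == len(s)`; all calls satisfy pos ≤ len(s), where `≤` coincides.)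
def trieInsert (d : PySem.Dict (List Char) Int) (s : List Char) (pos : Nat) :
    PySem.Dict (List Char) Int :=
  let d' := d.insert (s.take pos) (d.getD (s.take pos) 0 + 1)
  if h : s.length ≤ pos then d'
  else trieInsert d' s (pos + 1)
termination_by s.length - pos
decreasing_by omega

def trieFind (d : PySem.Dict (List Char) Int) (s : List Char) (pos : Nat) : Nat :=
  if h : s.length ≤ pos then pos
  else if d.getD (s.take pos) 0 == 1 then pos
  else trieFind d s (pos + 1)
termination_by s.length - pos
decreasing_by omega

def solution (words : List String) : Int :=
  let trie := words.foldl (fun d s => trieInsert d s.toList 0) PySem.Dict.empty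
  words.foldl (fun answer s => answer + (trieFind trie s.toList 0 : Int)) 0

-- ===== PORT B =====
-- lcp(s, t): the while loop of Source B, as structural recursion on the two lists.
def lcpB : List Char → List Char → Nat
  | a :: as, b :: bs => if a = b then lcpB as bs + 1 else 0
  | _, _ => 0

-- the inner `for j, t in enumerate(words)` loop of Source B computing m
def bestLcp (words : List String) (i : Int) (s : String) : Int :=
  (PySem.List.enumerate words 0).foldl
    (fun m q => if q.1 ≠ i then max m ((lcpB s.toList q.2.toList : Nat) : Int) else m) (-1)

def solution_alt (words : List String) : Int :=
  (PySem.List.enumerate words 0).foldl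
    (fun answer p => answer + min (p.2.toList.length : Int) (bestLcp words p.1 p.2 + 1)) 0

-- ===== PRECONDITION & SPEC =====
def Spec_solution (words : List String) (out : Int) : Prop := out = solution_alt words
instance (words : List String) (out : Int) : Decidable (Spec_solution words out) := by unfold Spec_solution; infer_instance

-- ===== CLAIM (what is proved, stated in full; the proofs are below) =====
def Claim_equal_solution : Prop := ∀ (words : List String), Dom_solution words → Spec_solution words (solution words)

-- ===== LEMMAS AND PROOFS =====

-- the count A's trie stores at the node with path k: one per inserted word having k as prefix
lemma getD_trieInsert (s k : List Char) :
    ∀ (n pos : Nat) (d : PySem.Dict (List Char) Int), s.length - pos ≤ n → pos ≤ s.length →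
      (trieInsert d s pos).getD k 0 =
        d.getD k 0 + (if pos ≤ k.length ∧ k <+: s then 1 else 0) := by
  intro n
  induction n with
  | zero =>
    intro pos d hn hpos
    have hps : pos = s.length := by omega
    rw [trieInsert]
    simp only [dif_pos (show s.length ≤ pos by omega)]
    rw [List.take_of_length_le (by omega), PySem.Dict.getD_insert]
    by_cases hk : k = s
    · subst hk
      simp [hps]
    · have hc : ¬ (pos ≤ k.length ∧ k <+: s) := by
        rintro ⟨h1, h2⟩
        exact hk (h2.eq_of_length (le_antisymm h2.length_le (hps ▸ h1)))
      simp [hk, hc]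
  | succ n ih =>
    intro pos d hn hpos
    by_cases h : s.length ≤ pos
    · have hps : pos = s.length := by omega
      rw [trieInsert]
      simp only [dif_pos h]
      rw [List.take_of_length_le (by omega), PySem.Dict.getD_insert]
      by_cases hk : k = s
      · subst hk
        simp [hps]
      · have hc : ¬ (pos ≤ k.length ∧ k <+: s) := by
          rintro ⟨h1, h2⟩
          exact hk (h2.eq_of_length (le_antisymm h2.length_le (hps ▸ h1)))
        simp [hk, hc]
    · rw [trieInsert]
      simp only [dif_neg h]
      rw [ih (pos + 1) _ (by omega) (by omega), PySem.Dict.getD_insert]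
      by_cases hk : k = s.take pos
      · have hlen : k.length = pos := by
          rw [hk, List.length_take]
          omega
        have hpre : k <+: s := hk ▸ List.take_prefix _ _
        rw [if_pos hk, if_neg (show ¬ (pos + 1 ≤ k.length ∧ k <+: s) from
            fun hx => absurd hx.1 (by omega)),
          if_pos (⟨by omega, hpre⟩ : pos ≤ k.length ∧ k <+: s), hk]
        omega
      · rw [if_neg hk]
        by_cases hc : pos ≤ k.length ∧ k <+: s
        · have h1 : pos + 1 ≤ k.length := by
            rcases Nat.lt_or_ge pos k.length with hlt | hge
            · omega
            · exfalso
              have hkl : k.length = pos := le_antisymm hge hc.1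
              exact hk (by rw [List.prefix_iff_eq_take.mp hc.2, hkl])
          rw [if_pos ⟨h1, hc.2⟩, if_pos hc]
        · rw [if_neg (fun hx => hc ⟨by omega, hx.2⟩), if_neg hc]

-- the whole trie: the count at path k counts the words with prefix k
lemma getD_build (ws : List String) (d : PySem.Dict (List Char) Int) (k : List Char) :
    (ws.foldl (fun d s => trieInsert d s.toList 0) d).getD k 0 =
      d.getD k 0 + (ws.countP (fun w => decide (k <+: w.toList)) : Int) := by
  induction ws generalizing d with
  | nil => simp
  | cons w ws ih =>
    rw [List.foldl_cons, ih,
      getD_trieInsert w.toList k w.toList.length 0 d (by omega) (by omega),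
      List.countP_cons]
    by_cases h : k <+: w.toList
    · simp only [h, decide_true, and_true, Nat.zero_le, true_and, if_true]
      push_cast
      ring
    · simp only [h, decide_false, and_false, if_false]
      push_cast
      ring

-- prefix-of-length-p versus the longest common prefix
lemma take_prefix_iff_lcp (s w : List Char) (p : Nat) (hp : p ≤ s.length) :
    s.take p <+: w ↔ p ≤ lcpB s w := by
  induction s generalizing w p with
  | nil =>
    have : p = 0 := by simpa using hp
    subst this
    simp
  | cons a as ih =>
    cases p with
    | zero => simp
    | succ p =>
      cases w with
      | nil => simp [lcpB]
      | cons b bs =>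
        by_cases hab : a = b
        · subst hab
          rw [List.take_succ_cons, List.cons_prefix_cons,
            ih bs p (by simpa using hp)]
          simp [lcpB]
        · simp [lcpB, hab, List.cons_prefix_cons]

-- split the count over an enumerated list at one index
lemma countP_split (l : List (Int × String)) (pr : List Char → Prop) [DecidablePred pr]
    (i : Int) (s : String) (hmem : (i, s) ∈ l) (hnd : (l.map Prod.fst).Nodup)
    (hs : pr s.toList) :
    l.countP (fun q => decide (pr q.2.toList)) =
      1 + l.countP (fun q => decide (q.1 ≠ i ∧ pr q.2.toList)) := by
  induction l with
  | nil => simp at hmem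
  | cons q l ih =>
    obtain ⟨j, t⟩ := q
    simp only [List.map_cons, List.nodup_cons] at hnd
    by_cases hj : j = i
    · subst hj
      have ht : t = s := by
        rcases List.mem_cons.mp hmem with h | h
        · exact ((Prod.ext_iff.mp h).2).symm
        · exact absurd (List.mem_map.mpr ⟨(j, s), h, rfl⟩) hnd.1
      subst ht
      have hcongr : l.countP (fun q => decide (q.1 ≠ j ∧ pr q.2.toList)) =
          l.countP (fun q => decide (pr q.2.toList)) := by
        apply List.countP_congr
        intro x hx
        have hxj : x.1 ≠ j := fun he => hnd.1 (List.mem_map.mpr ⟨x, hx, he⟩)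
        simp [hxj]
      rw [List.countP_cons, List.countP_cons, hcongr]
      have h1 : (decide (pr (j, t).2.toList) : Bool) = true := by simpa using hs
      have h2 : (decide ((j, t).1 ≠ j ∧ pr (j, t).2.toList) : Bool) = false := by simp
      rw [h1, h2]
      simp
      omega
    · have hmem' : (i, s) ∈ l := by
        rcases List.mem_cons.mp hmem with h | h
        · exact absurd ((Prod.ext_iff.mp h).1) (fun he => hj he.symm)
        · exact h
      rw [List.countP_cons, List.countP_cons, ih hmem' hnd.2]
      have h2 : (decide ((j, t).1 ≠ i ∧ pr (j, t).2.toList) : Bool)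
          = (decide (pr (j, t).2.toList) : Bool) := by simp [hj]
      rw [h2]
      omega

-- the inner max-fold is < p iff the seed and every counted lcp are < p
lemma foldl_max_lt_iff (l : List (Int × String)) (i : Int) (s : String) (m0 p : Int) :
    l.foldl (fun m q => if q.1 ≠ i then max m ((lcpB s.toList q.2.toList : Nat) : Int) else m) m0 < p
      ↔ m0 < p ∧ ∀ q ∈ l, q.1 ≠ i → ((lcpB s.toList q.2.toList : Nat) : Int) < p := by
  induction l generalizing m0 with
  | nil => simp
  | cons q l ih =>
    simp only [List.foldl_cons, ih, List.mem_cons]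
    by_cases hq : q.1 ≠ i
    · simp only [if_pos hq, max_lt_iff]
      constructor
      · rintro ⟨⟨h1, h2⟩, h3⟩
        exact ⟨h1, fun x hx hxi => by
          rcases hx with rfl | hx
          · exact h2
          · exact h3 x hx hxi⟩
      · rintro ⟨h1, h2⟩
        exact ⟨⟨h1, h2 q (Or.inl rfl) hq⟩, fun x hx => h2 x (Or.inr hx)⟩
    · simp only [if_neg hq]
      constructor
      · rintro ⟨h1, h2⟩
        exact ⟨h1, fun x hx hxi => by
          rcases hx with rfl | hx
          · exact absurd hxi hq
          · exact h2 x hx hxi⟩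
      · rintro ⟨h1, h2⟩
        exact ⟨h1, fun x hx => h2 x (Or.inr hx)⟩

lemma bestLcp_neg_one_le (words : List String) (i : Int) (s : String) :
    -1 ≤ bestLcp words i s := by
  by_contra h
  have := (foldl_max_lt_iff (PySem.List.enumerate words 0) i s (-1) (-1)).mp
    (by unfold bestLcp at h; omega)
  omega

-- A's find, run from any position up to the target, lands on the target
lemma trieFind_eq (t : PySem.Dict (List Char) Int) (sl : List Char) (m : Int) (hm : -1 ≤ m)
    (hstar : ∀ p : Nat, p ≤ sl.length → (t.getD (sl.take p) 0 = 1 ↔ m < (p : Int))) :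
    ∀ n pos, sl.length - pos ≤ n → pos ≤ min sl.length (m + 1).toNat →
      trieFind t sl pos = min sl.length (m + 1).toNat := by
  intro n
  induction n with
  | zero =>
    intro pos hn hpos
    have h1 : sl.length ≤ pos := by omega
    have : pos = min sl.length (m + 1).toNat := by omega
    rw [trieFind, dif_pos h1, this]
  | succ n ih =>
    intro pos hn hpos
    by_cases h1 : sl.length ≤ pos
    · have : pos = min sl.length (m + 1).toNat := by omega
      rw [trieFind, dif_pos h1, this]
    · rw [trieFind, dif_neg h1]
      by_cases h2 : pos = min sl.length (m + 1).toNat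
      · have hstop : t.getD (sl.take pos) 0 = 1 := by
          rw [hstar pos (by omega)]
          omega
        rw [if_pos (by simpa using hstop), h2]
      · have hlt : pos < min sl.length (m + 1).toNat := by omega
        have hne : t.getD (sl.take pos) 0 ≠ 1 := by
          simp only [ne_eq, hstar pos (by omega)]
          omega
        rw [if_neg (by simpa using hne)]
        exact ih (pos + 1) (by omega) (by omega)

-- per-word equality: A's find on the built trie = B's min(len, maxlcp + 1)
lemma perWord (words : List String) (i : Int) (s : String)
    (hmem : (i, s) ∈ PySem.List.enumerate words 0) :
    (trieFind (words.foldl (fun d w => trieInsert d w.toList 0) PySem.Dict.empty) s.toList 0 : Int)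
      = min (s.toList.length : Int) (bestLcp words i s + 1) := by
  set e := PySem.List.enumerate words 0 with he
  set m := bestLcp words i s with hmdef
  have hm : -1 ≤ m := bestLcp_neg_one_le words i s
  have hnd : (e.map Prod.fst).Nodup := by
    have h1 := (PySem.List.pairwise_lt_enumerate words (0 : Int)).imp
      (fun h => ne_of_lt h)
    exact (List.pairwise_map).mpr h1
  -- key fact: the trie count at prefix p of s is 1 iff every other word's lcp is < p
  have hstar : ∀ p : Nat, p ≤ s.toList.length →
      ((words.foldl (fun d w => trieInsert d w.toList 0) PySem.Dict.empty).getD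
        (s.toList.take p) 0 = 1 ↔ m < (p : Int)) := by
    intro p hp
    rw [getD_build, PySem.Dict.getD_empty]
    have hwords : words.countP (fun w => decide (s.toList.take p <+: w.toList)) =
        e.countP (fun q => decide (s.toList.take p <+: q.2.toList)) := by
      conv_lhs => rw [← PySem.List.map_snd_enumerate words 0]
      rw [List.countP_map]
      rfl
    rw [hwords, countP_split e _ i s hmem hnd (List.take_prefix _ _)]
    have hz : e.countP (fun q => decide (q.1 ≠ i ∧ s.toList.take p <+: q.2.toList)) = 0
        ↔ m < (p : Int) := by
      rw [List.countP_eq_zero]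
      rw [hmdef]
      unfold bestLcp
      rw [← he, foldl_max_lt_iff]
      constructor
      · intro h
        refine ⟨by omega, fun q hq hqi => ?_⟩
        have := h q hq
        simp only [decide_eq_true_eq, not_and] at this
        have hnp : ¬ (s.toList.take p <+: q.2.toList) := this hqi
        rw [take_prefix_iff_lcp _ _ _ hp] at hnp
        omega
      · rintro ⟨_, h⟩ q hq
        simp only [decide_eq_true_eq, not_and]
        intro hqi
        rw [take_prefix_iff_lcp _ _ _ hp]
        have := h q hq hqi
        omega
    constructor
    · intro h
      rw [← hz]
      omega
    · intro h
      rw [← hz] at h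
      omega
  have := trieFind_eq _ s.toList m hm hstar (s.toList.length) 0 (by omega) (by omega)
  rw [this]
  have h1 : m + 1 = ((m + 1).toNat : Int) := (Int.toNat_of_nonneg (by omega)).symm
  omega

-- ===== VERDICT (by name: the statement is the Claim_ definition above) =====
theorem solution_spec : Claim_equal_solution := by
  intro words _
  unfold Spec_solution solution solution_alt
  rw [PySem.List.foldl_add, PySem.List.foldl_add]
  congr 1
  refine congrArg List.sum ?_
  apply List.ext_getElem
  · simp [PySem.List.length_enumerate]
  intro k h1 h2
  have hk : k < words.length := by simpa using h1
  rw [List.getElem_map, List.getElem_map, PySem.List.getElem_enumerate]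
  exact perWord words (0 + (k : Int)) words[k]
    ((PySem.List.mem_enumerate_iff words 0 _).mpr ⟨k, hk, rfl⟩)
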